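-- pv_equiv track=rewrite | github.com/yanansun2020/leetcode | python/string/1233-Remove-Sub-Folders-from-the-Filesystem.py | match_parent_folder
-- ===== SOURCE A (Python) =====
-- def match_parent_folder(sub_folder, parent_folder):
--     sub_folder = sub_folder + "/"
--     # left, right = 0, len(parent_folder)-1
--     # while left <= right:
--     #     mid = left + (right-left)//2
--     #     if parent_folder[mid].split
--     for parent in parent_folder:
--         parent = parent + "/"
--         if len(sub_folder) >= len(parent):
--             if sub_folder[0:len(parent)] == parent:
--                 return True
--     return False
-- ===== SOURCE B (Python) =====
-- def match_parent_folder(sub_folder, parent_folder):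
--     parents = set(parent_folder)
--     s = sub_folder + "/"
--     return any(s[:i] in parents for i in range(len(s)) if s[i] == "/")
-- ===== Notes on version B (the rewrite author's own statement) =====
-- stated objective: alternative
-- what changed: Instead of scanning every parent and comparing it against sub_folder's prefix, B builds a set of the parents once and enumerates sub_folder's '/'-boundary prefixes, testing each by an O(1) set lookup.
import Mathlib
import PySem

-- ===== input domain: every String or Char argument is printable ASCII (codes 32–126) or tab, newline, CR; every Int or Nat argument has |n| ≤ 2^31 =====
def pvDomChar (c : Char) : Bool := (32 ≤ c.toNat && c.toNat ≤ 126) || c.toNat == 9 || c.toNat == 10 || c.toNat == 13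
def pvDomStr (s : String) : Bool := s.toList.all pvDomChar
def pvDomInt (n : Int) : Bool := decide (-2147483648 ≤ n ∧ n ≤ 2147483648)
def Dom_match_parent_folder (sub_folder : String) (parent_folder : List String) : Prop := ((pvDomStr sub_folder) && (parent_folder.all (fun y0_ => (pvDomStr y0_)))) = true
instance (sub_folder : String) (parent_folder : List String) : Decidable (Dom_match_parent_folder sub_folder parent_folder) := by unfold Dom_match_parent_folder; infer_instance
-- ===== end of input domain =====

-- B replaces A's scan over all parents by a set of parents plus one pass over sub_folder's
-- segment boundaries with O(1) lookups (objective: alternative decomposition).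

-- ===== PORT A =====
-- A's for-loop with early return, on code-point lists (exact for ASCII strings).
def matchLoopA (s : List Char) : List String → Bool
  | [] => false
  | parent :: rest =>
    let p := parent.toList ++ ['/']
    if s.length ≥ p.length then
      if PySem.List.slice s (some 0) (some (p.length : Int)) = p then true
      else matchLoopA s rest
    else matchLoopA s rest

def match_parent_folder (sub_folder : String) (parent_folder : List String) : Bool :=
  matchLoopA (sub_folder.toList ++ ['/']) parent_folder

-- ===== PORT B =====
def match_parent_folder_alt (sub_folder : String) (parent_folder : List String) : Bool :=
  let parents : PySem.Set (List Char) := PySem.Set.ofList (parent_folder.map String.toList)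
  let s := sub_folder.toList ++ ['/']
  (List.range s.length).any (fun i => s[i]? = some '/' && PySem.Set.contains parents (s.take i))

-- ===== PRECONDITION & SPEC =====
def Spec_match_parent_folder (sub_folder : String) (parent_folder : List String) (out : Bool) : Prop := out = match_parent_folder_alt sub_folder parent_folder
instance (sub_folder : String) (parent_folder : List String) (out : Bool) : Decidable (Spec_match_parent_folder sub_folder parent_folder out) := by unfold Spec_match_parent_folder; infer_instance

-- ===== CLAIM (what is proved, stated in full; the proofs are below) =====
def Claim_equal_match_parent_folder : Prop := ∀ (sub_folder : String) (parent_folder : List String), Dom_match_parent_folder sub_folder parent_folder → Spec_match_parent_folder sub_folder parent_folder (match_parent_folder sub_folder parent_folder)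

-- ===== LEMMAS AND PROOFS =====

-- s[0:len p] is s.take (len p).
theorem slice_take (s : List Char) (n : Nat) :
    PySem.List.slice s (some 0) (some (n : Int)) = s.take n := by
  simp [PySem.List.slice_zero_start, PySem.List.slice_to_natCast]

-- A's per-parent test is exactly "p ++ ['/'] is a prefix of s".
theorem matchLoopA_iff (s : List Char) (ps : List String) :
    matchLoopA s ps = true ↔ ∃ p ∈ ps, (p.toList ++ ['/']) <+: s := by
  induction ps with
  | nil => simp [matchLoopA]
  | cons q rest ih =>
    simp only [matchLoopA, List.mem_cons]
    constructor
    · intro h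
      split_ifs at h with h1 h2
      · rw [slice_take] at h2
        exact ⟨q, Or.inl rfl, List.prefix_iff_eq_take.mpr h2.symm⟩
      · rcases (ih.mp h) with ⟨p, hp, hpre⟩
        exact ⟨p, Or.inr hp, hpre⟩
      · rcases (ih.mp h) with ⟨p, hp, hpre⟩
        exact ⟨p, Or.inr hp, hpre⟩
    · rintro ⟨p, hp | hp, hpre⟩
      · subst hp
        have hlen : (p.toList ++ ['/']).length ≤ s.length := hpre.length_le
        have htake : s.take (p.toList ++ ['/']).length = p.toList ++ ['/'] :=
          (List.prefix_iff_eq_take.mp hpre).symm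
        rw [if_pos hlen, slice_take, if_pos htake]
      · split_ifs with h1 h2
        · rfl
        · exact ih.mpr ⟨p, hp, hpre⟩
        · exact ih.mpr ⟨p, hp, hpre⟩

-- "q ++ ['/'] is a prefix of s" ↔ "some '/'-boundary i of s has s.take i = q".
theorem prefix_slash_iff (q s : List Char) :
    (q ++ ['/']) <+: s ↔ ∃ i < s.length, s[i]? = some '/' ∧ s.take i = q := by
  constructor
  · rintro ⟨t, rfl⟩
    rw [List.append_assoc]
    refine ⟨q.length, by simp, ?_, ?_⟩
    · rw [List.getElem?_append_right (le_refl _)]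
      simp
    · simp
  · rintro ⟨i, hi, hget, htake⟩
    have h1 : s.take (i+1) = q ++ ['/'] := by
      rw [List.take_add_one, hget, htake]
      simp
    rw [← h1]
    exact List.take_prefix _ _

theorem alt_iff (s : List Char) (ps : List String) :
    ((List.range s.length).any
      (fun i => s[i]? = some '/' && PySem.Set.contains (PySem.Set.ofList (ps.map String.toList)) (s.take i))) = true
    ↔ ∃ p ∈ ps, ∃ i < s.length, s[i]? = some '/' ∧ s.take i = p.toList := by
  simp only [List.any_eq_true, List.mem_range, Bool.and_eq_true,
    PySem.Set.contains_iff, PySem.Set.mem_ofList, List.mem_map, decide_eq_true_eq]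
  constructor
  · rintro ⟨i, hi, hget, p, hp, hptl⟩
    exact ⟨p, hp, i, hi, hget, hptl.symm⟩
  · rintro ⟨p, hp, i, hi, hget, htake⟩
    exact ⟨i, hi, hget, p, hp, htake.symm⟩

-- ===== VERDICT (by name: the statement is the Claim_ definition above) =====
theorem match_parent_folder_spec : Claim_equal_match_parent_folder := by
  intro sub_folder parent_folder _
  unfold Spec_match_parent_folder match_parent_folder match_parent_folder_alt
  simp only []
  rw [Bool.eq_iff_iff, matchLoopA_iff, alt_iff]
  constructor
  · rintro ⟨p, hp, hpre⟩
    exact ⟨p, hp, (prefix_slash_iff _ _).mp hpre⟩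
  · rintro ⟨p, hp, hex⟩
    exact ⟨p, hp, (prefix_slash_iff _ _).mpr hex⟩
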